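-- pv_equiv track=rewrite | github.com/VesterlundCoder/DreamsRNS-ROCm-LUMI | 6F5Sweeps/worker_variantB_skeleton.py | variant_b_dirs_for_shift
-- ===== SOURCE A (Python) =====
-- from typing import List, Dict, Tuple, Optional, Any
--
-- def variant_b_dirs_for_shift(
--     s_idx: int,
--     n_dirs: int,
--     dirs_per_shift: int,
--     stride: int,
--     mix_a: int,
--     mix_b: int,
-- ) -> List[int]:
--     """Deterministic pairing: return list of d_idx for a given s_idx."""
--     base = (mix_a * s_idx + mix_b) % n_dirs
--     return [(base + k * stride) % n_dirs for k in range(dirs_per_shift)]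
-- ===== SOURCE B (Python) =====
-- def variant_b_dirs_for_shift(
--     s_idx: int,
--     n_dirs: int,
--     dirs_per_shift: int,
--     stride: int,
--     mix_a: int,
--     mix_b: int,
-- ):
--     """Accumulator version: thread the current direction forward by repeated
--     modular addition of stride instead of recomputing base + k*stride."""
--     cur = (mix_a * s_idx + mix_b) % n_dirs
--     out = []
--     remaining = dirs_per_shift
--     while remaining > 0:
--         out.append(cur)
--         cur = (cur + stride) % n_dirs
--         remaining -= 1
--     return out
-- ===== Notes on version B (the rewrite author's own statement) =====
-- stated objective: alternative
-- what changed: Replaces the per-element closed form (base + k*stride) % n_dirs over range(dirs_per_shift) by a while loop threading a running accumulator cur that is updated by (cur + stride) % n_dirs each step, never multiplying by k.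
import Mathlib
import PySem

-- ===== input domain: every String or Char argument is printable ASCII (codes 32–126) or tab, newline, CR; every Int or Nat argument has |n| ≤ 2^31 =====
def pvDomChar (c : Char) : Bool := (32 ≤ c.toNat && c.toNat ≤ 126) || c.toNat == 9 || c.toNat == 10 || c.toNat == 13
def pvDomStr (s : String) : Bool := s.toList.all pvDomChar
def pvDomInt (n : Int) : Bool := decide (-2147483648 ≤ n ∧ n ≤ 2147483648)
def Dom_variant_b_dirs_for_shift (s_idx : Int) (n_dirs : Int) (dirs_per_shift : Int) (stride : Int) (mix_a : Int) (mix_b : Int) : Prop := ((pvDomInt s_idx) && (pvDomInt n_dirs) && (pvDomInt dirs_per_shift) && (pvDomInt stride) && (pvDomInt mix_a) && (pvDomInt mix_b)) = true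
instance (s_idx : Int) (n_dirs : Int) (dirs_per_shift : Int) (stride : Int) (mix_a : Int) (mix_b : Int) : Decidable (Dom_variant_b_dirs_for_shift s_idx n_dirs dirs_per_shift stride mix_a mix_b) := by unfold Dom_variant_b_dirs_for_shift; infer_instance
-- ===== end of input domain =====

-- B replaces the per-element closed form (base + k*stride) % n_dirs with a while loop
-- threading a running accumulator cur updated by (cur + stride) % n_dirs (objective: alternative).


-- ===== PORT A =====
def variant_b_dirs_for_shift (s_idx : Int) (n_dirs : Int) (dirs_per_shift : Int) (stride : Int) (mix_a : Int) (mix_b : Int) : List Int :=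
  let base := PySem.Int.mod (mix_a * s_idx + mix_b) n_dirs
  (PySem.List.pyRange 0 dirs_per_shift 1).map (fun k => PySem.Int.mod (base + k * stride) n_dirs)

-- ===== PORT B =====
-- while remaining > 0: append cur; cur = (cur + stride) % n_dirs; remaining -= 1
def pvAltLoop (n_dirs : Int) (stride : Int) : Nat → Int → List Int
  | 0, _ => []
  | Nat.succ m, cur => cur :: pvAltLoop n_dirs stride m (PySem.Int.mod (cur + stride) n_dirs)

def variant_b_dirs_for_shift_alt (s_idx : Int) (n_dirs : Int) (dirs_per_shift : Int) (stride : Int) (mix_a : Int) (mix_b : Int) : List Int :=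
  pvAltLoop n_dirs stride dirs_per_shift.toNat (PySem.Int.mod (mix_a * s_idx + mix_b) n_dirs)

-- ===== PRECONDITION & SPEC =====
-- Python A raises ZeroDivisionError exactly when n_dirs == 0 (the initial '% n_dirs').
def Pre_variant_b_dirs_for_shift (s_idx : Int) (n_dirs : Int) (dirs_per_shift : Int) (stride : Int) (mix_a : Int) (mix_b : Int) : Prop := n_dirs ≠ 0
instance (s_idx : Int) (n_dirs : Int) (dirs_per_shift : Int) (stride : Int) (mix_a : Int) (mix_b : Int) : Decidable (Pre_variant_b_dirs_for_shift s_idx n_dirs dirs_per_shift stride mix_a mix_b) := by unfold Pre_variant_b_dirs_for_shift; infer_instance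

def pvWitness_variant_b_dirs_for_shift : Int × Int × Int × Int × Int × Int := (3, 7, 4, -2, 5, 1)

def Spec_variant_b_dirs_for_shift (s_idx : Int) (n_dirs : Int) (dirs_per_shift : Int) (stride : Int) (mix_a : Int) (mix_b : Int) (out : List Int) : Prop := out = variant_b_dirs_for_shift_alt s_idx n_dirs dirs_per_shift stride mix_a mix_b
instance (s_idx : Int) (n_dirs : Int) (dirs_per_shift : Int) (stride : Int) (mix_a : Int) (mix_b : Int) (out : List Int) : Decidable (Spec_variant_b_dirs_for_shift s_idx n_dirs dirs_per_shift stride mix_a mix_b out) := by unfold Spec_variant_b_dirs_for_shift; infer_instance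

-- ===== CLAIM (what is proved, stated in full; the proofs are below) =====
def Claim_equal_variant_b_dirs_for_shift : Prop := ∀ (s_idx : Int) (n_dirs : Int) (dirs_per_shift : Int) (stride : Int) (mix_a : Int) (mix_b : Int), Dom_variant_b_dirs_for_shift s_idx n_dirs dirs_per_shift stride mix_a mix_b → Pre_variant_b_dirs_for_shift s_idx n_dirs dirs_per_shift stride mix_a mix_b → Spec_variant_b_dirs_for_shift s_idx n_dirs dirs_per_shift stride mix_a mix_b (variant_b_dirs_for_shift s_idx n_dirs dirs_per_shift stride mix_a mix_b)

-- ===== LEMMAS AND PROOFS =====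

-- Python '%' is Int.fmod; adding s after reducing mod n does not change the residue.
lemma pv_fmod_add_fmod (x s n : Int) : Int.fmod (Int.fmod x n + s) n = Int.fmod (x + s) n := by
  conv_lhs => rw [Int.fmod_def x n]
  have h : x - n * x.fdiv n + s = x + s + n * (-(x.fdiv n)) := by ring
  rw [h, Int.add_mul_fmod_self_left]

lemma pvAltLoop_eq (n s : Int) (m : Nat) (x : Int) :
    pvAltLoop n s m (Int.fmod x n) = (List.range m).map (fun (k : Nat) => Int.fmod (x + (k : Int) * s) n) := by
  induction m generalizing x with
  | zero => simp [pvAltLoop]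
  | succ m ih =>
    rw [List.range_succ_eq_map]
    have h1 : PySem.Int.mod (Int.fmod x n + s) n = Int.fmod (x + s) n := pv_fmod_add_fmod x s n
    simp only [pvAltLoop, h1, ih (x + s), List.map_cons, List.map_map, Nat.cast_zero, zero_mul,
      add_zero, List.cons.injEq, true_and]
    apply List.map_congr_left
    intro k _
    simp only [Function.comp_apply]
    congr 1
    push_cast
    ring

-- ===== VERDICT (by name: the statement is the Claim_ definition above) =====
theorem variant_b_dirs_for_shift_spec : Claim_equal_variant_b_dirs_for_shift := by
  intro s_idx n_dirs dirs_per_shift stride mix_a mix_b _ _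
  unfold Spec_variant_b_dirs_for_shift variant_b_dirs_for_shift variant_b_dirs_for_shift_alt
  set x := mix_a * s_idx + mix_b with hx
  have hbase : PySem.Int.mod x n_dirs = Int.fmod (Int.fmod x n_dirs) n_dirs := by
    simp [PySem.Int.mod, Int.fmod_fmod_of_dvd _ (dvd_refl n_dirs)]
  rw [hbase, pvAltLoop_eq, PySem.List.pyRange_one]
  simp only [sub_zero, List.map_map]
  apply List.map_congr_left
  intro k _
  simp [Function.comp, PySem.Int.mod]
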